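-- pv_equiv track=rewrite | github.com/helpfuldolphin/mathledger | backend/health/p5_topology_reality_adapter.py | _get_domain_decision_path
-- ===== SOURCE A (Python) =====
-- from typing import Any, Dict, List, Optional, Tuple
--
-- def _get_domain_decision_path(xcor_codes: List[str], summary: Dict[str, Any]) -> str:
--     """Determine domain decision path per Step 5 decision tree."""
--     # Check TOPO-CRIT-*
--     if any("TOPO-CRIT" in code for code in xcor_codes):
--         return "conflict_codes contains TOPO-CRIT-* → Issue is TOPOLOGY"
--     # Check BNDL-CRIT-*
--     if any("BNDL-CRIT" in code for code in xcor_codes):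
--         return "conflict_codes contains BNDL-CRIT-* → Issue is BUNDLE"
--     # Check XCOR-* only
--     if all(code.startswith("XCOR-") for code in xcor_codes) and xcor_codes:
--         return "conflict_codes contains XCOR-* only → Issue is EXTERNAL"
--     # No critical codes
--     domain = summary.get("p5_hypothesis", {}).get("domain", "UNKNOWN")
--     return f"No critical codes → Derived domain={domain}"
-- ===== SOURCE B (Python) =====
-- def _get_domain_decision_path(xcor_codes, summary):
--     """Classify each code with a numeric severity rank, then decide from the
--     extremes (max/min) of the rank multiset instead of re-scanning the codes."""
--     def _rank(code):
--         if "TOPO-CRIT" in code: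
--             return 3
--         if "BNDL-CRIT" in code:
--             return 2
--         return 1 if code.startswith("XCOR-") else 0
--     ranks = [_rank(code) for code in xcor_codes]
--     hi = max(ranks, default=0)
--     if hi == 3:
--         return "conflict_codes contains TOPO-CRIT-* → Issue is TOPOLOGY"
--     if hi == 2:
--         return "conflict_codes contains BNDL-CRIT-* → Issue is BUNDLE"
--     if min(ranks, default=0) == 1:
--         return "conflict_codes contains XCOR-* only → Issue is EXTERNAL"
--     domain = summary.get("p5_hypothesis", {}).get("domain", "UNKNOWN")
--     return f"No critical codes → Derived domain={domain}"
-- ===== Notes on version B (the rewrite author's own statement) =====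
-- stated objective: alternative
-- what changed: Replaces the three predicate scans (any/any/all over the codes) by a classify-then-aggregate scheme: each code is mapped to a numeric severity rank (3=TOPO-CRIT, 2=BNDL-CRIT, 1=XCOR- prefix, 0=other) and the decision is read off the max and min of the rank list.
import Mathlib
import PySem

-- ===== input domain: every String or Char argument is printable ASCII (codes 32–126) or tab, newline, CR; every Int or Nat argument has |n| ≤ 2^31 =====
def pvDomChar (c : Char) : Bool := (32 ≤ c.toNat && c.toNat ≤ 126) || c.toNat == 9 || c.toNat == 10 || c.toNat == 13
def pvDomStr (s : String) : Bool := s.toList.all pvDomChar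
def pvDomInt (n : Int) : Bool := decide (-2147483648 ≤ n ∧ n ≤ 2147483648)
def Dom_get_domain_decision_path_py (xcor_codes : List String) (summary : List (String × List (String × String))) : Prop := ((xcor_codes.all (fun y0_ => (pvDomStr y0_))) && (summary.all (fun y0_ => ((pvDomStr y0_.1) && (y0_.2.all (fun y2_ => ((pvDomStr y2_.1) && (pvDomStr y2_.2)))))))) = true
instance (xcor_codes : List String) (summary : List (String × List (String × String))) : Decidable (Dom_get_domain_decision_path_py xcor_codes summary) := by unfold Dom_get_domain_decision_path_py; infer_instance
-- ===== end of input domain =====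

-- ===== PORT A =====
-- B replaces A's three predicate scans by a rank classification (3/2/1/0 per code) decided from max/min of the ranks; objective: alternative decomposition, same cost.
def get_domain_decision_path_py (xcor_codes : List String) (summary : List (String × List (String × String))) : String :=
  if xcor_codes.any (fun code => PySem.Str.isIn "TOPO-CRIT" code) then
    "conflict_codes contains TOPO-CRIT-* → Issue is TOPOLOGY"
  else if xcor_codes.any (fun code => PySem.Str.isIn "BNDL-CRIT" code) then
    "conflict_codes contains BNDL-CRIT-* → Issue is BUNDLE"
  else if xcor_codes.all (fun code => PySem.Str.startswith code "XCOR-") && !xcor_codes.isEmpty then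
    "conflict_codes contains XCOR-* only → Issue is EXTERNAL"
  else
    "No critical codes → Derived domain=" ++
      (PySem.Dict.getD (PySem.Dict.mk ((PySem.Dict.getD (PySem.Dict.mk summary) "p5_hypothesis" []))) "domain" "UNKNOWN")

-- ===== PORT B =====
def pvRank (code : String) : Int :=
  if PySem.Str.isIn "TOPO-CRIT" code then 3
  else if PySem.Str.isIn "BNDL-CRIT" code then 2
  else if PySem.Str.startswith code "XCOR-" then 1 else 0

def get_domain_decision_path_py_alt (xcor_codes : List String) (summary : List (String × List (String × String))) : String :=
  let ranks := xcor_codes.map pvRank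
  let hi := PySem.List.maxD ranks (fun x => x) 0
  if hi = 3 then
    "conflict_codes contains TOPO-CRIT-* → Issue is TOPOLOGY"
  else if hi = 2 then
    "conflict_codes contains BNDL-CRIT-* → Issue is BUNDLE"
  else if PySem.List.minD ranks (fun x => x) 0 = 1 then
    "conflict_codes contains XCOR-* only → Issue is EXTERNAL"
  else
    "No critical codes → Derived domain=" ++
      (PySem.Dict.getD (PySem.Dict.mk ((PySem.Dict.getD (PySem.Dict.mk summary) "p5_hypothesis" []))) "domain" "UNKNOWN")

-- ===== PRECONDITION & SPEC =====
def Spec_get_domain_decision_path_py (xcor_codes : List String) (summary : List (String × List (String × String))) (out : String) : Prop := out = get_domain_decision_path_py_alt xcor_codes summary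
instance (xcor_codes : List String) (summary : List (String × List (String × String))) (out : String) : Decidable (Spec_get_domain_decision_path_py xcor_codes summary out) := by unfold Spec_get_domain_decision_path_py; infer_instance

-- ===== CLAIM (what is proved, stated in full; the proofs are below) =====
def Claim_equal_get_domain_decision_path_py : Prop := ∀ (xcor_codes : List String) (summary : List (String × List (String × String))), Dom_get_domain_decision_path_py xcor_codes summary → Spec_get_domain_decision_path_py xcor_codes summary (get_domain_decision_path_py xcor_codes summary)

-- ===== LEMMAS AND PROOFS =====
theorem pvRank_le_three (c : String) : pvRank c ≤ 3 := by
  unfold pvRank; split_ifs <;> norm_num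

theorem pvRank_eq_three_iff (c : String) :
    pvRank c = 3 ↔ PySem.Str.isIn "TOPO-CRIT" c = true := by
  unfold pvRank; split_ifs <;> simp_all

theorem pvRank_eq_two_iff (c : String) :
    pvRank c = 2 ↔ (PySem.Str.isIn "TOPO-CRIT" c = false ∧ PySem.Str.isIn "BNDL-CRIT" c = true) := by
  unfold pvRank; split_ifs <;> simp_all

theorem pvRank_of_no_crit (c : String)
    (hT : PySem.Str.isIn "TOPO-CRIT" c = false) (hB : PySem.Str.isIn "BNDL-CRIT" c = false) :
    pvRank c = if PySem.Str.startswith c "XCOR-" then 1 else 0 := by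
  unfold pvRank; rw [hT, hB]; simp

-- the running max of the ranks of c :: rest is itself a rank of some code in c :: rest
theorem pvHi_mem (c : String) (rest : List String) :
    ∃ s ∈ c :: rest, (rest.map pvRank).foldl max (pvRank c) = pvRank s := by
  rcases PySem.List.foldl_max_mem (rest.map pvRank) (pvRank c) with h | h
  · exact ⟨c, List.mem_cons_self, h⟩
  · rcases List.mem_map.mp h with ⟨s, hs, hr⟩
    exact ⟨s, List.mem_cons_of_mem _ hs, hr.symm⟩

theorem pvLo_mem (c : String) (rest : List String) :
    ∃ s ∈ c :: rest, (rest.map pvRank).foldl min (pvRank c) = pvRank s := by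
  rcases PySem.List.foldl_min_mem (rest.map pvRank) (pvRank c) with h | h
  · exact ⟨c, List.mem_cons_self, h⟩
  · rcases List.mem_map.mp h with ⟨s, hs, hr⟩
    exact ⟨s, List.mem_cons_of_mem _ hs, hr.symm⟩

theorem pvRank_le_hi (c : String) (rest : List String) (s : String) (hs : s ∈ c :: rest) :
    pvRank s ≤ (rest.map pvRank).foldl max (pvRank c) := by
  rcases List.mem_cons.mp hs with rfl | hs
  · exact (PySem.List.le_foldl_max (rest.map pvRank) (pvRank s)).1
  · exact (PySem.List.le_foldl_max (rest.map pvRank) (pvRank c)).2 _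
      (List.mem_map.mpr ⟨s, hs, rfl⟩)

theorem pvLo_le_rank (c : String) (rest : List String) (s : String) (hs : s ∈ c :: rest) :
    (rest.map pvRank).foldl min (pvRank c) ≤ pvRank s := by
  rcases List.mem_cons.mp hs with rfl | hs
  · exact (PySem.List.foldl_min_le (rest.map pvRank) (pvRank s)).1
  · exact (PySem.List.foldl_min_le (rest.map pvRank) (pvRank c)).2 _
      (List.mem_map.mpr ⟨s, hs, rfl⟩)

-- ===== VERDICT (by name: the statement is the Claim_ definition above) =====
theorem get_domain_decision_path_py_spec : Claim_equal_get_domain_decision_path_py := by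
  intro xs summary _
  unfold Spec_get_domain_decision_path_py
  cases xs with
  | nil =>
      simp [get_domain_decision_path_py, get_domain_decision_path_py_alt,
        PySem.List.maxD, PySem.List.minD, PySem.List.max?, PySem.List.min?]
  | cons c rest =>
      have hmax : PySem.List.maxD ((c :: rest).map pvRank) (fun x => x) 0
          = (rest.map pvRank).foldl max (pvRank c) := by
        simp [PySem.List.maxD, PySem.List.max?_id_cons]
      have hmin : PySem.List.minD ((c :: rest).map pvRank) (fun x => x) 0
          = (rest.map pvRank).foldl min (pvRank c) := by
        simp [PySem.List.minD, PySem.List.min?_id_cons]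
      unfold get_domain_decision_path_py get_domain_decision_path_py_alt
      simp only [hmax, hmin]
      by_cases hT : (c :: rest).any (fun code => PySem.Str.isIn "TOPO-CRIT" code) = true
      · -- some code contains TOPO-CRIT: hi = 3
        have h3 : (rest.map pvRank).foldl max (pvRank c) = 3 := by
          rcases List.any_eq_true.mp hT with ⟨s, hs, hTs⟩
          have h1 : (3 : Int) ≤ (rest.map pvRank).foldl max (pvRank c) := by
            have := pvRank_le_hi c rest s hs
            rwa [(pvRank_eq_three_iff s).mpr hTs] at this
          rcases pvHi_mem c rest with ⟨t, _, ht⟩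
          have := pvRank_le_three t
          omega
        rw [if_pos hT, if_pos h3]
      · -- no TOPO-CRIT anywhere
        rw [if_neg hT]
        have hTall : ∀ s ∈ c :: rest, PySem.Str.isIn "TOPO-CRIT" s = false := by
          intro s hs
          cases h' : PySem.Str.isIn "TOPO-CRIT" s with
          | false => rfl
          | true => exact absurd (List.any_eq_true.mpr ⟨s, hs, h'⟩) hT
        have hne3 : (rest.map pvRank).foldl max (pvRank c) ≠ 3 := by
          intro h
          rcases pvHi_mem c rest with ⟨t, htmem, ht⟩
          rw [ht] at h
          have h3 := (pvRank_eq_three_iff t).mp h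
          rw [hTall t htmem] at h3
          exact Bool.noConfusion h3
        rw [if_neg hne3]
        by_cases hB : (c :: rest).any (fun code => PySem.Str.isIn "BNDL-CRIT" code) = true
        · -- some code contains BNDL-CRIT (none contains TOPO-CRIT): hi = 2
          have h2 : (rest.map pvRank).foldl max (pvRank c) = 2 := by
            rcases List.any_eq_true.mp hB with ⟨s, hs, hBs⟩
            have h1 : (2 : Int) ≤ (rest.map pvRank).foldl max (pvRank c) := by
              have := pvRank_le_hi c rest s hs
              rwa [(pvRank_eq_two_iff s).mpr ⟨hTall s hs, hBs⟩] at this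
            rcases pvHi_mem c rest with ⟨t, htmem, ht⟩
            have hub : pvRank t ≤ 2 := by
              unfold pvRank
              rw [hTall t htmem]
              rw [if_neg Bool.false_ne_true]
              split_ifs <;> norm_num
            omega
          rw [if_pos hB, if_pos h2]
        · -- no critical codes at all: every rank is 0 or 1
          rw [if_neg hB]
          have hBall : ∀ s ∈ c :: rest, PySem.Str.isIn "BNDL-CRIT" s = false := by
            intro s hs
            cases h' : PySem.Str.isIn "BNDL-CRIT" s with
            | false => rfl
            | true => exact absurd (List.any_eq_true.mpr ⟨s, hs, h'⟩) hB
          have hne2 : (rest.map pvRank).foldl max (pvRank c) ≠ 2 := by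
            intro h
            rcases pvHi_mem c rest with ⟨t, htmem, ht⟩
            rw [ht] at h
            have hB2 := ((pvRank_eq_two_iff t).mp h).2
            rw [hBall t htmem] at hB2
            exact Bool.noConfusion hB2
          rw [if_neg hne2]
          have hrank01 : ∀ s ∈ c :: rest,
              pvRank s = if PySem.Str.startswith s "XCOR-" then 1 else 0 := fun s hs =>
            pvRank_of_no_crit s (hTall s hs) (hBall s hs)
          by_cases hX : (c :: rest).all (fun code => PySem.Str.startswith code "XCOR-") = true
          · -- all start with XCOR-: every rank is 1, so lo = 1
            have hlo : (rest.map pvRank).foldl min (pvRank c) = 1 := by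
              rcases pvLo_mem c rest with ⟨t, htmem, ht⟩
              rw [ht, hrank01 t htmem,
                if_pos (List.all_eq_true.mp hX t htmem)]
            have hc : ((c :: rest).all (fun code => PySem.Str.startswith code "XCOR-")
                && !(c :: rest).isEmpty) = true := by rw [hX]; rfl
            rw [if_pos hc, if_pos hlo]
          · -- some code does not start with XCOR-: its rank is 0, so lo ≠ 1
            have hEx : ∃ s ∈ c :: rest, PySem.Str.startswith s "XCOR-" = false := by
              by_contra hc
              apply hX
              rw [List.all_eq_true]
              intro x hx
              cases h' : PySem.Str.startswith x "XCOR-" with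
              | true => rfl
              | false => exact absurd ⟨x, hx, h'⟩ hc
            have hlo : (rest.map pvRank).foldl min (pvRank c) ≠ 1 := by
              rcases hEx with ⟨s, hs, hsx⟩
              have h0 : pvRank s = 0 := by
                rw [hrank01 s hs, if_neg (by rw [hsx]; exact Bool.false_ne_true)]
              have hle := pvLo_le_rank c rest s hs
              rw [h0] at hle
              omega
            have hall : (c :: rest).all (fun code => PySem.Str.startswith code "XCOR-") = false := by
              cases h' : (c :: rest).all (fun code => PySem.Str.startswith code "XCOR-") with
              | false => rfl
              | true => exact absurd h' hX
            have hc : ¬ (((c :: rest).all (fun code => PySem.Str.startswith code "XCOR-")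
                && !(c :: rest).isEmpty) = true) := by rw [hall]; exact Bool.false_ne_true
            rw [if_neg hc, if_neg hlo]
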